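-- pv_equiv track=rewrite | github.com/iamjuli0/programas-UFAM | 1° periodo/IC/mercosul.py | placa
-- ===== SOURCE A (Python) =====
-- def loun(x):
--     if (65 <= ord(x) <= 90) or (97 <= ord(x) <= 122):
--         return 'L'
--     elif (48 <= ord(x) <= 57):
--         return 'N'
--     else:
--         return 'X'
--
-- def placa(x):
--     xs = list(x)
--
--     carro = ['L','L','L','N','L','N','N']
--     moto = ['L','L','L','N','N','L','N']
--     p = [loun(xs[i]) for i in range(len(x))]
--
--     if p == carro:
--         return 'Carro'
--     elif p == moto:
--         return 'Moto'
--     else: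
--         return 'Nada'
-- ===== SOURCE B (Python) =====
-- import re
--
-- _CARRO = re.compile(r'[A-Za-z]{3}[0-9][A-Za-z][0-9]{2}')
-- _MOTO = re.compile(r'[A-Za-z]{3}[0-9]{2}[A-Za-z][0-9]')
--
-- def placa(x):
--     if _CARRO.fullmatch(x):
--         return 'Carro'
--     if _MOTO.fullmatch(x):
--         return 'Moto'
--     return 'Nada'
-- ===== Notes on version B (the rewrite author's own statement) =====
-- stated objective: idiomatic
-- what changed: B replaces A's per-character L/N/X signature list compared against two template lists by two fixed-count ASCII character-class regexes matched with re.fullmatch (ported as a generic token-consuming matcher).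
import Mathlib
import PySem

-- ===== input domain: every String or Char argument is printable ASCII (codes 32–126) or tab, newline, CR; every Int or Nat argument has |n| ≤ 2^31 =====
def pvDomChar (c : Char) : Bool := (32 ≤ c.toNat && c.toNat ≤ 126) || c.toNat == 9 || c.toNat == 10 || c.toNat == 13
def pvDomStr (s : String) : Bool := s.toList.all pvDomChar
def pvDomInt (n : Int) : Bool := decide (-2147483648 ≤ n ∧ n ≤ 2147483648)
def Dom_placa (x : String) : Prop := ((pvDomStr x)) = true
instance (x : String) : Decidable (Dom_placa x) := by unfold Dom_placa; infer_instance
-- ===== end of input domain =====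

-- B matches the input against two fixed-count ASCII character-class regexes via
-- re.fullmatch instead of building A's L/N/X signature list (objective: idiomatic).

-- ===== PORT A =====
def loun (c : Char) : Char :=
  if (65 ≤ c.toNat ∧ c.toNat ≤ 90) ∨ (97 ≤ c.toNat ∧ c.toNat ≤ 122) then 'L'
  else if 48 ≤ c.toNat ∧ c.toNat ≤ 57 then 'N'
  else 'X'

def placa (x : String) : String :=
  let xs := x.toList
  let carro := ['L','L','L','N','L','N','N']
  let moto := ['L','L','L','N','N','L','N']
  -- [loun(xs[i]) for i in range(len(x))] : every index is in range, so it is map loun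
  let p := xs.map loun
  if p = carro then "Carro"
  else if p = moto then "Moto"
  else "Nada"

-- ===== PORT B =====
-- Hand port of re.fullmatch for Source B's patterns: each is a sequence of
-- (character class, repetition count) tokens with fixed counts, so matching is
-- deterministic consumption; exact for these regexes on all inputs.
def reAlpha (c : Char) : Bool := ('A' ≤ c && c ≤ 'Z') || ('a' ≤ c && c ≤ 'z')
def reDigit (c : Char) : Bool := '0' ≤ c && c ≤ '9'

-- consume exactly n chars satisfying p; none = match failure
def reTake (p : Char → Bool) : Nat → List Char → Option (List Char)
  | 0, s => some s
  | _ + 1, [] => none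
  | n + 1, c :: s => if p c then reTake p n s else none

def reConsume : List ((Char → Bool) × Nat) → List Char → Option (List Char)
  | [], s => some s
  | (p, n) :: toks, s =>
    match reTake p n s with
    | none => none
    | some r => reConsume toks r

-- fullmatch: the whole string must be consumed
def reFullmatch (toks : List ((Char → Bool) × Nat)) (s : List Char) : Bool :=
  match reConsume toks s with
  | some [] => true
  | _ => false

-- r'[A-Za-z]{3}[0-9][A-Za-z][0-9]{2}'
def carroPat : List ((Char → Bool) × Nat) := [(reAlpha, 3), (reDigit, 1), (reAlpha, 1), (reDigit, 2)]
-- r'[A-Za-z]{3}[0-9]{2}[A-Za-z][0-9]'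
def motoPat : List ((Char → Bool) × Nat) := [(reAlpha, 3), (reDigit, 2), (reAlpha, 1), (reDigit, 1)]

def placa_alt (x : String) : String :=
  if reFullmatch carroPat x.toList then "Carro"
  else if reFullmatch motoPat x.toList then "Moto"
  else "Nada"

-- ===== PRECONDITION & SPEC =====
def Spec_placa (x : String) (out : String) : Prop := out = placa_alt x
instance (x : String) (out : String) : Decidable (Spec_placa x out) := by unfold Spec_placa; infer_instance

-- ===== CLAIM (what is proved, stated in full; the proofs are below) =====
def Claim_equal_placa : Prop := ∀ (x : String), Dom_placa x → Spec_placa x (placa x)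

-- ===== LEMMAS AND PROOFS =====
theorem loun_eq_L (c : Char) : (loun c = 'L') = (reAlpha c = true) := by
  simp only [loun, reAlpha, Char.le_def, UInt32.le_iff_toNat_le, Char.toNat]
  split_ifs with h1 h2 <;> simp_all

theorem loun_eq_N (c : Char) : (loun c = 'N') = (reDigit c = true) := by
  simp only [loun, reDigit, Char.le_def, UInt32.le_iff_toNat_le, Char.toNat]
  split_ifs with h1 h2
  · simp_all
    omega
  · simp_all
  · simp_all

theorem reTake_some_length (p : Char → Bool) :
    ∀ (n : Nat) (s r : List Char), reTake p n s = some r → s.length = n + r.length := by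
  intro n
  induction n with
  | zero => intro s r h; simp [reTake] at h; simp [h]
  | succ n ih =>
    intro s r h
    cases s with
    | nil => simp [reTake] at h
    | cons c s =>
      simp only [reTake] at h
      by_cases hc : p c
      · simp [hc] at h
        have := ih s r h
        simp [List.length]; omega
      · simp [hc] at h

theorem reConsume_some_length :
    ∀ (toks : List ((Char → Bool) × Nat)) (s r : List Char),
      reConsume toks s = some r → s.length = (toks.map (·.2)).sum + r.length := by
  intro toks
  induction toks with
  | nil => intro s r h; simp [reConsume] at h; simp [h]
  | cons t toks ih =>
    intro s r h
    obtain ⟨p, n⟩ := t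
    simp only [reConsume] at h
    cases ht : reTake p n s with
    | none => rw [ht] at h; simp at h
    | some m =>
      rw [ht] at h
      have h1 := reTake_some_length p n s m ht
      have h2 := ih m r h
      simp [List.map]; omega

theorem reFullmatch_length {toks : List ((Char → Bool) × Nat)} {s : List Char}
    (h : reFullmatch toks s = true) : s.length = (toks.map (·.2)).sum := by
  unfold reFullmatch at h
  cases hc : reConsume toks s with
  | none => rw [hc] at h; simp at h
  | some r =>
    rw [hc] at h
    cases r with
    | nil => simpa using reConsume_some_length toks s [] hc
    | cons a t => simp at h

set_option maxHeartbeats 2000000 in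
theorem placa_agrees (x : String) : placa x = placa_alt x := by
  unfold placa placa_alt
  by_cases h7 : x.toList.length = 7
  · generalize hl : x.toList = l at h7 ⊢
    match l, h7 with
    | [a, b, c, d, e, f, g], _ =>
      simp only [reFullmatch, reConsume, reTake, carroPat, motoPat, List.map,
        List.cons.injEq, and_true, loun_eq_L, loun_eq_N]
      by_cases hA : reAlpha a <;> by_cases hB : reAlpha b <;> by_cases hC : reAlpha c <;>
        by_cases hD : reDigit d <;> by_cases hE : reAlpha e <;> by_cases hE' : reDigit e <;>
        by_cases hF : reAlpha f <;> by_cases hF' : reDigit f <;> by_cases hG : reDigit g <;>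
        simp_all [reTake]
  · have hc : reFullmatch carroPat x.toList = false := by
      cases h : reFullmatch carroPat x.toList
      · rfl
      · exact absurd (reFullmatch_length h) (by simpa [carroPat] using h7)
    have hm : reFullmatch motoPat x.toList = false := by
      cases h : reFullmatch motoPat x.toList
      · rfl
      · exact absurd (reFullmatch_length h) (by simpa [motoPat] using h7)
    have hA : x.toList.map loun ≠ ['L','L','L','N','L','N','N'] :=
      fun h => h7 (by simpa using congrArg List.length h)
    have hB : x.toList.map loun ≠ ['L','L','L','N','N','L','N'] :=
      fun h => h7 (by simpa using congrArg List.length h)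
    simp [hc, hm, hA, hB]

-- ===== VERDICT (by name: the statement is the Claim_ definition above) =====
theorem placa_spec : Claim_equal_placa := by
  intro x _
  exact placa_agrees x
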